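-- pv_equiv track=rewrite | github.com/rameshsurya10/Ai-Trade-Bot | src/ml/features/selector.py | get_indicator_category
-- ===== SOURCE A (Python) =====
-- INDICATOR_CATEGORIES = {
--     # Momentum - measures speed of price change
--     'momentum': [
--         'rsi_14', 'rsi_7', 'stoch_k', 'stoch_d',
--         'macd', 'macd_signal', 'macd_hist',
--         'roc_5', 'roc_10', 'williams_r', 'cci'
--     ],
--     # Trend - measures direction and strength
--     'trend': [
--         'adx', 'plus_di', 'minus_di', 'di_diff',
--         'trend_7', 'trend_14', 'trend_21',
--         'price_sma_7_ratio', 'price_sma_21_ratio', 'price_sma_50_ratio',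
--         'price_ema_21_ratio'
--     ],
--     # Volatility - measures price variability
--     'volatility': [
--         'atr_14', 'atr_7', 'bb_width', 'bb_position',
--         'volatility_7', 'volatility_14', 'volatility_30'
--     ],
--     # Volume - measures trading activity
--     'volume': [
--         'volume_ratio', 'volume_change', 'obv', 'obv_sma', 'money_flow'
--     ],
--     # Price - raw price-based features
--     'price': [
--         'returns', 'log_returns'
--     ],
--     # Pattern - candlestick patterns (basic)
--     'pattern': [
--         'candle_body_ratio', 'candle_wick_upper', 'candle_wick_lower',
--         'higher_high', 'lower_low', 'higher_close'
--     ],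
--     # Candlestick - Japanese candlestick patterns (reversal/continuation)
--     'candlestick': [
--         # Single candle
--         'doji', 'hammer', 'inverted_hammer', 'shooting_star', 'hanging_man',
--         'marubozu_bull', 'marubozu_bear', 'spinning_top',
--         # Two candle
--         'engulfing_bull', 'engulfing_bear', 'harami_bull', 'harami_bear',
--         'piercing_line', 'dark_cloud', 'tweezer_top', 'tweezer_bottom',
--         # Three candle
--         'morning_star', 'evening_star', 'three_white_soldiers', 'three_black_crows',
--         # Aggregates
--         'bullish_patterns', 'bearish_patterns', 'pattern_signal', 'reversal_pattern'
--     ]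
-- }
--
-- def get_indicator_category(indicator: str) -> str:
--     """Get category for an indicator."""
--     for category, indicators in INDICATOR_CATEGORIES.items():
--         if indicator in indicators:
--             return category
--     # Check for lagged features
--     if '_lag_' in indicator:
--         base = indicator.split('_lag_')[0]
--         return get_indicator_category(base)
--     # Check for regime/IMF features
--     if indicator.startswith('regime_'):
--         return 'regime'
--     if indicator.startswith('imf_'):
--         return 'decomposition'
--     return 'other'
-- ===== SOURCE B (Python) =====
-- # Precomputed flat indicator->category table; lookup is one dict access,
-- # with the '_lag_' suffix stripped via find/prefix instead of split+recursion.
-- INDICATOR_TO_CATEGORY = {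
--     'rsi_14': 'momentum',
--     'rsi_7': 'momentum',
--     'stoch_k': 'momentum',
--     'stoch_d': 'momentum',
--     'macd': 'momentum',
--     'macd_signal': 'momentum',
--     'macd_hist': 'momentum',
--     'roc_5': 'momentum',
--     'roc_10': 'momentum',
--     'williams_r': 'momentum',
--     'cci': 'momentum',
--     'adx': 'trend',
--     'plus_di': 'trend',
--     'minus_di': 'trend',
--     'di_diff': 'trend',
--     'trend_7': 'trend',
--     'trend_14': 'trend',
--     'trend_21': 'trend',
--     'price_sma_7_ratio': 'trend',
--     'price_sma_21_ratio': 'trend',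
--     'price_sma_50_ratio': 'trend',
--     'price_ema_21_ratio': 'trend',
--     'atr_14': 'volatility',
--     'atr_7': 'volatility',
--     'bb_width': 'volatility',
--     'bb_position': 'volatility',
--     'volatility_7': 'volatility',
--     'volatility_14': 'volatility',
--     'volatility_30': 'volatility',
--     'volume_ratio': 'volume',
--     'volume_change': 'volume',
--     'obv': 'volume',
--     'obv_sma': 'volume',
--     'money_flow': 'volume',
--     'returns': 'price',
--     'log_returns': 'price',
--     'candle_body_ratio': 'pattern',
--     'candle_wick_upper': 'pattern',
--     'candle_wick_lower': 'pattern',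
--     'higher_high': 'pattern',
--     'lower_low': 'pattern',
--     'higher_close': 'pattern',
--     'doji': 'candlestick',
--     'hammer': 'candlestick',
--     'inverted_hammer': 'candlestick',
--     'shooting_star': 'candlestick',
--     'hanging_man': 'candlestick',
--     'marubozu_bull': 'candlestick',
--     'marubozu_bear': 'candlestick',
--     'spinning_top': 'candlestick',
--     'engulfing_bull': 'candlestick',
--     'engulfing_bear': 'candlestick',
--     'harami_bull': 'candlestick',
--     'harami_bear': 'candlestick',
--     'piercing_line': 'candlestick',
--     'dark_cloud': 'candlestick',
--     'tweezer_top': 'candlestick',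
--     'tweezer_bottom': 'candlestick',
--     'morning_star': 'candlestick',
--     'evening_star': 'candlestick',
--     'three_white_soldiers': 'candlestick',
--     'three_black_crows': 'candlestick',
--     'bullish_patterns': 'candlestick',
--     'bearish_patterns': 'candlestick',
--     'pattern_signal': 'candlestick',
--     'reversal_pattern': 'candlestick',
-- }
--
--
-- def get_indicator_category(indicator: str) -> str:
--     """Get category for an indicator."""
--     i = indicator.find('_lag_')
--     base = indicator if i < 0 else indicator[:i]
--     cat = INDICATOR_TO_CATEGORY.get(base)
--     if cat is not None:
--         return cat
--     if base.startswith('regime_'):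
--         return 'regime'
--     if base.startswith('imf_'):
--         return 'decomposition'
--     return 'other'
-- ===== Notes on version B (the rewrite author's own statement) =====
-- stated objective: idiomatic
-- what changed: Replaced the per-call scan over every category's indicator list plus the '_lag_' recursion by a precomputed flat indicator-to-category dict literal looked up once, with the lagged suffix stripped up front via str.find and a prefix slice instead of split+recursion.
import Mathlib
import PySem

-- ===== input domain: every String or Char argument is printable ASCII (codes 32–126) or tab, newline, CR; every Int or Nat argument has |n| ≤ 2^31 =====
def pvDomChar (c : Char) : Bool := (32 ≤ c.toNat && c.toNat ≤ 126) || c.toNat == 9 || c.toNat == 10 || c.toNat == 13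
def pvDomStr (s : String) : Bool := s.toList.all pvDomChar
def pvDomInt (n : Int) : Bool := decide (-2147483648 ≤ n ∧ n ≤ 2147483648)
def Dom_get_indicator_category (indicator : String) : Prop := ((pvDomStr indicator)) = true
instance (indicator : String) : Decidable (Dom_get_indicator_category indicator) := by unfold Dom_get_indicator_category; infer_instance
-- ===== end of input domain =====

-- B replaces A's per-call scan over every category list (and its '_lag_' recursion)
-- by one lookup in a precomputed flat indicator->category dict, stripping the
-- lagged suffix up front with find + prefix slice (objective: idiomatic).


-- ===== PORT A =====
-- The module constant INDICATOR_CATEGORIES (a dict literal, as an assoc list in insertion order).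
def pvCats : List (String × List String) :=
  [("momentum",
    ["rsi_14", "rsi_7", "stoch_k", "stoch_d",
     "macd", "macd_signal", "macd_hist",
     "roc_5", "roc_10", "williams_r", "cci"]),
   ("trend",
    ["adx", "plus_di", "minus_di", "di_diff",
     "trend_7", "trend_14", "trend_21",
     "price_sma_7_ratio", "price_sma_21_ratio", "price_sma_50_ratio",
     "price_ema_21_ratio"]),
   ("volatility",
    ["atr_14", "atr_7", "bb_width", "bb_position",
     "volatility_7", "volatility_14", "volatility_30"]),
   ("volume",
    ["volume_ratio", "volume_change", "obv", "obv_sma", "money_flow"]),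
   ("price",
    ["returns", "log_returns"]),
   ("pattern",
    ["candle_body_ratio", "candle_wick_upper", "candle_wick_lower",
     "higher_high", "lower_low", "higher_close"]),
   ("candlestick",
    ["doji", "hammer", "inverted_hammer", "shooting_star", "hanging_man",
     "marubozu_bull", "marubozu_bear", "spinning_top",
     "engulfing_bull", "engulfing_bear", "harami_bull", "harami_bear",
     "piercing_line", "dark_cloud", "tweezer_top", "tweezer_bottom",
     "morning_star", "evening_star", "three_white_soldiers", "three_black_crows",
     "bullish_patterns", "bearish_patterns", "pattern_signal", "reversal_pattern"])]

-- indicator.split('_lag_')[0] in A's recursive branch.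
-- The 'none' arm is unreachable: the separator "_lag_" is nonempty, so split? never raises.
def pvBase (s : String) : String :=
  match PySem.Str.split? s "_lag_" with
  | some parts => (PySem.List.pyGet? parts 0).getD ""
  | none => ""

-- A's for-loop over INDICATOR_CATEGORIES.items() with early return.
def pvScan : List (String × List String) → String → Option String
  | [], _ => none
  | (c, inds) :: rest, s => if inds.contains s then some c else pvScan rest s

-- First segment of l when split on sep (used only to justify termination of A's recursion).
def pvFirstSeg (sep : List Char) : List Char → List Char
  | [] => []
  | c :: rest => if sep.isPrefixOf (c :: rest) then [] else c :: pvFirstSeg sep rest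

theorem pvGo_spec (sep : List Char) (hsep : sep ≠ []) :
    ∀ fuel l cur acc, l.length < fuel →
      ∃ r, PySem.Chars.splitOn.go sep fuel l cur acc
          = acc.reverse ++ (cur.reverse ++ pvFirstSeg sep l) :: r := by
  intro fuel
  induction fuel with
  | zero => intro l cur acc h; omega
  | succ fuel ih =>
    intro l cur acc h
    match l with
    | [] =>
      exact ⟨[], by rw [PySem.Chars.splitOn.go.eq_def]; simp [pvFirstSeg]⟩
    | c :: rest =>
      have hsl : 1 ≤ sep.length := by
        cases sep with
        | nil => exact absurd rfl hsep
        | cons a t => simp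
      by_cases hp : sep.isPrefixOf (c :: rest) = true
      · have hlen : (List.drop sep.length (c :: rest)).length < fuel := by
          simp only [List.length_drop, List.length_cons] at *
          omega
        obtain ⟨r, hr⟩ := ih (List.drop sep.length (c :: rest)) [] (cur.reverse :: acc) hlen
        refine ⟨pvFirstSeg sep (List.drop sep.length (c :: rest)) :: r, ?_⟩
        rw [PySem.Chars.splitOn.go.eq_def]
        simp only [hp, if_true, hr]
        simp [pvFirstSeg, hp]
      · have hlen : rest.length < fuel := by
          simp only [List.length_cons] at h; omega
        obtain ⟨r, hr⟩ := ih rest (c :: cur) acc hlen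
        refine ⟨r, ?_⟩
        rw [PySem.Chars.splitOn.go.eq_def]
        simp only [hp, if_false, Bool.false_eq_true, hr]
        simp [pvFirstSeg, hp]

theorem pvSplitOn_head (sep l : List Char) (hsep : sep ≠ []) :
    ∃ r, PySem.Chars.splitOn l sep = pvFirstSeg sep l :: r := by
  obtain ⟨r, hr⟩ := pvGo_spec sep hsep (l.length + 1) l [] [] (Nat.lt_succ_self _)
  exact ⟨r, by simpa [PySem.Chars.splitOn] using hr⟩

theorem pvBase_eq (s : String) :
    pvBase s = String.ofList (pvFirstSeg "_lag_".toList s.toList) := by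
  obtain ⟨r, hr⟩ := pvSplitOn_head "_lag_".toList s.toList (by decide)
  rw [show ("_lag_".toList) = ['_','l','a','g','_'] by decide] at hr
  simp [pvBase, PySem.Str.split?, PySem.Chars.split?, PySem.List.pyGet?, PySem.List.pyIdx?, hr]

theorem pvFirstSeg_length_lt (sep : List Char) (hsep : sep ≠ []) :
    ∀ l, sep <:+: l → (pvFirstSeg sep l).length < l.length := by
  intro l
  induction l with
  | nil => intro h; exact absurd (List.infix_nil.mp h) hsep
  | cons c rest ih =>
    intro h
    by_cases hp : sep.isPrefixOf (c :: rest) = true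
    · simp [pvFirstSeg, hp]
    · rcases List.infix_cons_iff.mp h with hpre | hin
      · exact absurd (List.isPrefixOf_iff_prefix.mpr hpre) (by simpa using hp)
      · simpa [pvFirstSeg, hp] using ih hin

-- termination of A's lagged-feature recursion
theorem pvBase_lt (s : String) (h : PySem.Str.isIn "_lag_" s = true) :
    (pvBase s).toList.length < s.toList.length := by
  rw [pvBase_eq, String.toList_ofList]
  exact pvFirstSeg_length_lt _ (by decide) _ ((PySem.Str.isIn_iff_infix _ _).mp h)

def get_indicator_category (indicator : String) : String :=
  match pvScan pvCats indicator with
  | some c => c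
  | none =>
    if h : PySem.Str.isIn "_lag_" indicator = true then
      get_indicator_category (pvBase indicator)
    else if PySem.Str.startswith indicator "regime_" then "regime"
    else if PySem.Str.startswith indicator "imf_" then "decomposition"
    else "other"
termination_by indicator.toList.length
decreasing_by exact pvBase_lt indicator h

-- ===== PORT B =====
-- The module constant INDICATOR_TO_CATEGORY: a flat dict literal, one entry per indicator.
def pvPairs : List (String × String) :=
  [("rsi_14", "momentum"), ("rsi_7", "momentum"), ("stoch_k", "momentum"),
   ("stoch_d", "momentum"), ("macd", "momentum"), ("macd_signal", "momentum"),
   ("macd_hist", "momentum"), ("roc_5", "momentum"), ("roc_10", "momentum"),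
   ("williams_r", "momentum"), ("cci", "momentum"), ("adx", "trend"),
   ("plus_di", "trend"), ("minus_di", "trend"), ("di_diff", "trend"),
   ("trend_7", "trend"), ("trend_14", "trend"), ("trend_21", "trend"),
   ("price_sma_7_ratio", "trend"), ("price_sma_21_ratio", "trend"), ("price_sma_50_ratio", "trend"),
   ("price_ema_21_ratio", "trend"), ("atr_14", "volatility"), ("atr_7", "volatility"),
   ("bb_width", "volatility"), ("bb_position", "volatility"), ("volatility_7", "volatility"),
   ("volatility_14", "volatility"), ("volatility_30", "volatility"), ("volume_ratio", "volume"),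
   ("volume_change", "volume"), ("obv", "volume"), ("obv_sma", "volume"),
   ("money_flow", "volume"), ("returns", "price"), ("log_returns", "price"),
   ("candle_body_ratio", "pattern"), ("candle_wick_upper", "pattern"), ("candle_wick_lower", "pattern"),
   ("higher_high", "pattern"), ("lower_low", "pattern"), ("higher_close", "pattern"),
   ("doji", "candlestick"), ("hammer", "candlestick"), ("inverted_hammer", "candlestick"),
   ("shooting_star", "candlestick"), ("hanging_man", "candlestick"), ("marubozu_bull", "candlestick"),
   ("marubozu_bear", "candlestick"), ("spinning_top", "candlestick"), ("engulfing_bull", "candlestick"),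
   ("engulfing_bear", "candlestick"), ("harami_bull", "candlestick"), ("harami_bear", "candlestick"),
   ("piercing_line", "candlestick"), ("dark_cloud", "candlestick"), ("tweezer_top", "candlestick"),
   ("tweezer_bottom", "candlestick"), ("morning_star", "candlestick"), ("evening_star", "candlestick"),
   ("three_white_soldiers", "candlestick"), ("three_black_crows", "candlestick"), ("bullish_patterns", "candlestick"),
   ("bearish_patterns", "candlestick"), ("pattern_signal", "candlestick"), ("reversal_pattern", "candlestick")]

def pvTable : PySem.Dict String String := PySem.Dict.ofList pvPairs

def get_indicator_category_alt (indicator : String) : String :=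
  let i := PySem.Str.find indicator "_lag_"
  let base := if i < 0 then indicator else PySem.Str.slice indicator none (some i)
  match pvTable.get? base with
  | some c => c
  | none =>
    if PySem.Str.startswith base "regime_" then "regime"
    else if PySem.Str.startswith base "imf_" then "decomposition"
    else "other"

-- ===== PRECONDITION & SPEC =====
def Spec_get_indicator_category (indicator : String) (out : String) : Prop := out = get_indicator_category_alt indicator
instance (indicator : String) (out : String) : Decidable (Spec_get_indicator_category indicator out) := by unfold Spec_get_indicator_category; infer_instance

-- ===== CLAIM =====
def Claim_equal_get_indicator_category : Prop := ∀ (indicator : String), Dom_get_indicator_category indicator → Spec_get_indicator_category indicator (get_indicator_category indicator)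

-- ===== LEMMAS AND PROOFS =====

theorem pvFirstSeg_prefix (sep : List Char) : ∀ l, pvFirstSeg sep l <+: l := by
  intro l
  induction l with
  | nil => simp [pvFirstSeg]
  | cons c rest ih =>
    by_cases hp : sep.isPrefixOf (c :: rest) = true
    · simp [pvFirstSeg, hp]
    · simpa [pvFirstSeg, hp] using ih

theorem pvFirstSeg_eq_of_not_infix (sep : List Char) :
    ∀ l, ¬ sep <:+: l → pvFirstSeg sep l = l := by
  intro l
  induction l with
  | nil => intro _; rfl
  | cons c rest ih =>
    intro h
    have hp : sep.isPrefixOf (c :: rest) = false := by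
      by_contra hc
      rw [Bool.not_eq_false, List.isPrefixOf_iff_prefix] at hc
      exact h (List.infix_cons_iff.mpr (Or.inl hc))
    have hrest : ¬ sep <:+: rest := fun hi => h (List.infix_cons_iff.mpr (Or.inr hi))
    simp [pvFirstSeg, hp, ih hrest]

theorem pvFirstSeg_not_infix (sep : List Char) (hsep : sep ≠ []) :
    ∀ l, ¬ sep <:+: pvFirstSeg sep l := by
  intro l
  induction l with
  | nil => simpa [pvFirstSeg, List.infix_nil] using hsep
  | cons c rest ih =>
    by_cases hp : sep.isPrefixOf (c :: rest) = true
    · simpa [pvFirstSeg, hp, List.infix_nil] using hsep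
    · simp only [pvFirstSeg, hp, if_false, Bool.false_eq_true]
      intro hi
      rcases List.infix_cons_iff.mp hi with hpre | hin
      · have h1 : pvFirstSeg sep rest <+: rest := pvFirstSeg_prefix sep rest
        have h2 : (c :: pvFirstSeg sep rest) <+: (c :: rest) :=
          List.cons_prefix_cons.mpr ⟨rfl, h1⟩
        exact absurd (List.isPrefixOf_iff_prefix.mpr (hpre.trans h2)) (by simpa using hp)
      · exact ih hin

-- sep occurs right after the first segment (when it occurs at all)
theorem pvFirstSeg_drop_prefix (sep : List Char) :
    ∀ l, sep <:+: l → sep <+: l.drop (pvFirstSeg sep l).length := by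
  intro l
  induction l with
  | nil =>
    intro h
    have hs := List.infix_nil.mp h
    subst hs
    simp [pvFirstSeg]
  | cons c rest ih =>
    intro h
    by_cases hp : sep.isPrefixOf (c :: rest) = true
    · simpa [pvFirstSeg, hp] using List.isPrefixOf_iff_prefix.mp hp
    · rcases List.infix_cons_iff.mp h with hpre | hin
      · exact absurd (List.isPrefixOf_iff_prefix.mpr hpre) (by simpa using hp)
      · simpa [pvFirstSeg, hp] using ih hin

-- and at no earlier index
theorem pvFirstSeg_min (sep : List Char) :
    ∀ l i, i < (pvFirstSeg sep l).length → ¬ sep <+: l.drop i := by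
  intro l
  induction l with
  | nil => intro i h; simp [pvFirstSeg] at h
  | cons c rest ih =>
    intro i h
    by_cases hp : sep.isPrefixOf (c :: rest) = true
    · simp [pvFirstSeg, hp] at h
    · simp only [pvFirstSeg, hp, if_false, Bool.false_eq_true, List.length_cons] at h
      match i with
      | 0 =>
        intro hpre
        exact hp (List.isPrefixOf_iff_prefix.mpr (by simpa using hpre))
      | i + 1 => exact fun hpre => ih i (by omega) (by simpa using hpre)

-- B's find-and-slice base equals A's split-based base
theorem pvAltBase_eq (s : String) :
    (if PySem.Str.find s "_lag_" < 0 then s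
     else PySem.Str.slice s none (some (PySem.Str.find s "_lag_"))) = pvBase s := by
  by_cases h : PySem.Chars.isIn "_lag_".toList s.toList = true
  · have hin : ("_lag_".toList) <:+: s.toList := (PySem.Chars.isIn_iff_infix _ _).mp h
    have hnn : 0 ≤ PySem.Chars.find s.toList "_lag_".toList :=
      (PySem.Chars.find_nonneg_iff _ _).mpr hin
    obtain ⟨hpre, hmin⟩ := PySem.Chars.find_spec hnn
    have hEq : (PySem.Chars.find s.toList "_lag_".toList).toNat
        = (pvFirstSeg "_lag_".toList s.toList).length := by
      set n := (PySem.Chars.find s.toList "_lag_".toList).toNat with hn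
      set m := (pvFirstSeg "_lag_".toList s.toList).length with hm
      rcases Nat.lt_trichotomy n m with hlt | heq | hgt
      · exact absurd hpre (pvFirstSeg_min _ _ n hlt)
      · exact heq
      · exact absurd (pvFirstSeg_drop_prefix _ _ hin) (hmin m hgt)
    have hfind : PySem.Str.find s "_lag_" = PySem.Chars.find s.toList "_lag_".toList := by
      simp [PySem.Str.find_eq]
    rw [hfind, if_neg (by omega)]
    have hseg : pvFirstSeg "_lag_".toList s.toList <+: s.toList := pvFirstSeg_prefix _ _
    rw [pvBase_eq]
    apply String.toList_injective
    rw [PySem.Str.toList_slice, PySem.Chars.slice_eq_listSlice,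
      PySem.List.slice_to _ hnn, hEq, String.toList_ofList]
    simpa using (List.prefix_iff_eq_take.mp hseg).symm
  · have hni : ¬ ("_lag_".toList) <:+: s.toList :=
      (PySem.Chars.isIn_eq_false_iff _ _).mp (by simpa using h)
    have hfind : PySem.Str.find s "_lag_" = -1 := by
      simp only [PySem.Str.find_eq]
      exact (PySem.Chars.find_eq_neg_one_iff _ _).mpr hni
    rw [hfind, if_pos (by norm_num), pvBase_eq,
      pvFirstSeg_eq_of_not_infix _ _ hni, String.ofList_toList]

-- the flat dict literal is the flattening of A's nested table
def pvFlat (cats : List (String × List String)) : List (String × String) :=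
  cats.flatMap (fun p => p.2.map (fun n => (n, p.1)))

theorem pvInner_get? (inds : List String) (c s : String) (rest : List (String × String)) :
    (PySem.Dict.mk (inds.map (fun n => (n, c)) ++ rest)).get? s
      = if inds.contains s then some c else (PySem.Dict.mk rest).get? s := by
  induction inds with
  | nil => simp
  | cons i t ih =>
    simp only [List.map_cons, List.cons_append, PySem.Dict.get?_mk_cons, ih,
      List.contains_cons]
    by_cases hi : i = s
    · simp [hi]
    · simp [hi, Ne.symm hi]

theorem pvFlat_get? (cats : List (String × List String)) (s : String) :
    (PySem.Dict.mk (pvFlat cats)).get? s = pvScan cats s := by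
  induction cats with
  | nil => rfl
  | cons p rest ih =>
    obtain ⟨c, inds⟩ := p
    simp only [pvFlat, List.flatMap_cons, pvScan] at *
    rw [pvInner_get?, ih]

set_option maxRecDepth 100000 in
theorem pvLookup (s : String) : pvTable.get? s = pvScan pvCats s := by
  have h1 : pvTable = PySem.Dict.mk (pvFlat pvCats) := by decide
  rw [h1, pvFlat_get?]

theorem pvScan_none (s : String) (cats : List (String × List String))
    (hc : ∀ p ∈ cats, ∀ y ∈ p.2, PySem.Str.isIn "_lag_" y = false)
    (hs : PySem.Str.isIn "_lag_" s = true) : pvScan cats s = none := by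
  induction cats with
  | nil => rfl
  | cons p rest ih =>
    obtain ⟨c, inds⟩ := p
    have hmem : inds.contains s = false := by
      by_contra hcc
      rw [Bool.not_eq_false] at hcc
      have : s ∈ inds := by simpa using hcc
      have := hc (c, inds) (List.mem_cons_self) s this
      rw [this] at hs; exact Bool.false_ne_true hs
    simp only [pvScan, hmem, if_false, Bool.false_eq_true]
    exact ih (fun p hp => hc p (List.mem_cons_of_mem _ hp))

theorem pvBase_self (s : String) (h : PySem.Str.isIn "_lag_" s = false) : pvBase s = s := by
  rw [pvBase_eq]
  rw [pvFirstSeg_eq_of_not_infix _ _ (by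
    have := (PySem.Chars.isIn_eq_false_iff "_lag_".toList s.toList).mp (by simpa using h)
    exact this)]
  exact String.ofList_toList

theorem pvBase_noLag (s : String) : PySem.Str.isIn "_lag_" (pvBase s) = false := by
  rw [PySem.Str.isIn_eq, pvBase_eq]
  simp only [String.toList_ofList]
  refine (PySem.Chars.isIn_eq_false_iff _ _).mpr (pvFirstSeg_not_infix _ ?_ _)
  decide

-- B unfolded through pvAltBase_eq: one lookup on pvBase s, then the prefix branches
set_option maxRecDepth 100000 in
theorem pvAlt_eq (s : String) :
    get_indicator_category_alt s
      = match pvScan pvCats (pvBase s) with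
        | some c => c
        | none =>
          if PySem.Str.startswith (pvBase s) "regime_" then "regime"
          else if PySem.Str.startswith (pvBase s) "imf_" then "decomposition"
          else "other" := by
  show (match pvTable.get? (if PySem.Str.find s "_lag_" < 0 then s
            else PySem.Str.slice s none (some (PySem.Str.find s "_lag_"))) with
        | some c => c
        | none =>
          if PySem.Str.startswith (if PySem.Str.find s "_lag_" < 0 then s
              else PySem.Str.slice s none (some (PySem.Str.find s "_lag_"))) "regime_" then "regime"
          else if PySem.Str.startswith (if PySem.Str.find s "_lag_" < 0 then s
              else PySem.Str.slice s none (some (PySem.Str.find s "_lag_"))) "imf_" then "decomposition"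
          else "other") = _
  rw [pvAltBase_eq s, pvLookup]

set_option maxRecDepth 8192 in
theorem pvNoLag_eq (s : String) (h : PySem.Str.isIn "_lag_" s = false) :
    get_indicator_category s = get_indicator_category_alt s := by
  rw [pvAlt_eq, pvBase_self s h]
  unfold get_indicator_category
  cases hscan : pvScan pvCats s
  case some c => simp
  case none =>
    have h' : PySem.Chars.isIn ['_','l','a','g','_'] s.toList = false := by simpa using h
    simp [h']

set_option maxRecDepth 8192 in
theorem pvMain (s : String) : get_indicator_category s = get_indicator_category_alt s := by
  by_cases h : PySem.Str.isIn "_lag_" s = true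
  · have hscan : pvScan pvCats s = none := pvScan_none s pvCats (by decide) h
    rw [get_indicator_category.eq_def]
    simp only [hscan]
    rw [dif_pos h]
    rw [pvNoLag_eq (pvBase s) (pvBase_noLag s), pvAlt_eq (pvBase s), pvAlt_eq s,
      pvBase_self (pvBase s) (pvBase_noLag s)]
  · exact pvNoLag_eq s (by simpa using h)

-- ===== VERDICT =====
theorem get_indicator_category_spec : Claim_equal_get_indicator_category := by
  intro s _
  unfold Spec_get_indicator_category
  exact pvMain s
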